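-- pv_equiv track=rewrite | github.com/Howard-Miller-Hekman/furniture-scene-generator | furniture_scene_generator/services.py | detect_style
-- ===== SOURCE A (Python) =====
-- def detect_style(hints):
--     """Detect style from hints"""
--     if any(h in hints for h in ['modern', 'contemporary']):
--         return 'modern'
--     elif any(h in hints for h in ['rustic', 'farmhouse']):
--         return 'rustic'
--     elif 'industrial' in hints:
--         return 'industrial'
--     elif 'transitional' in hints:
--         return 'transitional'
--     elif any(h in hints for h in ['vintage', 'antique']):
--         return 'vintage'
--     elif any(h in hints for h in ['elegant', 'formal']):
--         return 'elegant traditional'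
--     elif any(h in hints for h in ['traditional', 'classic']):
--         return 'traditional'
--     else:
--         return 'traditional'
-- ===== SOURCE B (Python) =====
-- _RANK = {'modern': 0, 'contemporary': 0, 'rustic': 1, 'farmhouse': 1,
--          'industrial': 2, 'transitional': 3, 'vintage': 4, 'antique': 4,
--          'elegant': 5, 'formal': 5, 'traditional': 6, 'classic': 6}
-- _STYLES = ['modern', 'rustic', 'industrial', 'transitional', 'vintage',
--            'elegant traditional', 'traditional', 'traditional']
--
-- def detect_style(hints):
--     """Detect style from hints"""
--     best = 7
--     for h in hints:
--         best = min(best, _RANK.get(h, 7))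
--     return _STYLES[best]
-- ===== Notes on version B (the rewrite author's own statement) =====
-- stated objective: alternative
-- what changed: Instead of a keyword cascade that repeatedly scans the hints list, B makes a single pass over the hints, mapping each hint to a priority rank via a keyword-to-rank dict and keeping the minimum rank, then indexes a styles array with it.
import Mathlib
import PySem

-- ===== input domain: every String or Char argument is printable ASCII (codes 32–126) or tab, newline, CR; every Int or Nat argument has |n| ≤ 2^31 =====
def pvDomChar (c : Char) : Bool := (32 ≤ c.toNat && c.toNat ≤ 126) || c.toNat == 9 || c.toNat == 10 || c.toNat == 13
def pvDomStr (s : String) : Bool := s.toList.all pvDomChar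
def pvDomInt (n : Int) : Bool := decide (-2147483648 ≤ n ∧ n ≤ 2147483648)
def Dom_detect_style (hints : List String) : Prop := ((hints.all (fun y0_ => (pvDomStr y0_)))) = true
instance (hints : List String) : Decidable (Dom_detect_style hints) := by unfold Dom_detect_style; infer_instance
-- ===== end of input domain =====

-- B replaces A's keyword cascade of repeated list scans by one pass over the hints computing the minimal priority rank via a keyword→rank dict, then indexing a styles array (alternative decomposition; same asymptotic cost).


-- ===== PORT A =====
def detect_style (hints : List String) : String :=
  if (["modern", "contemporary"].any fun h => hints.contains h) then "modern"
  else if (["rustic", "farmhouse"].any fun h => hints.contains h) then "rustic"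
  else if hints.contains "industrial" then "industrial"
  else if hints.contains "transitional" then "transitional"
  else if (["vintage", "antique"].any fun h => hints.contains h) then "vintage"
  else if (["elegant", "formal"].any fun h => hints.contains h) then "elegant traditional"
  else if (["traditional", "classic"].any fun h => hints.contains h) then "traditional"
  else "traditional"

-- ===== PORT B =====
-- _RANK: keyword → priority rank (Python dict literal)
def rankDict : PySem.Dict String Nat :=
  PySem.Dict.ofList
    [("modern", 0), ("contemporary", 0), ("rustic", 1), ("farmhouse", 1),
     ("industrial", 2), ("transitional", 3), ("vintage", 4), ("antique", 4),
     ("elegant", 5), ("formal", 5), ("traditional", 6), ("classic", 6)]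

-- _STYLES
def stylesList : List String :=
  ["modern", "rustic", "industrial", "transitional", "vintage",
   "elegant traditional", "traditional", "traditional"]

-- _RANK.get(h, 7)
def rnk (h : String) : Nat := PySem.Dict.getD rankDict h 7

-- the loop 'best = 7; for h in hints: best = min(best, _RANK.get(h, 7))', then _STYLES[best];
-- the index 'best' is always < 8, so List.getD's default "" only totalizes the list indexing and is never used
def detect_style_alt (hints : List String) : String :=
  stylesList.getD (hints.foldl (fun best h => min best (rnk h)) 7) ""

-- ===== PRECONDITION & SPEC =====
def Spec_detect_style (hints : List String) (out : String) : Prop := out = detect_style_alt hints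
instance (hints : List String) (out : String) : Decidable (Spec_detect_style hints out) := by unfold Spec_detect_style; infer_instance

-- ===== CLAIM (what is proved, stated in full; the proofs are below) =====
def Claim_equal_detect_style : Prop := ∀ (hints : List String), Dom_detect_style hints → Spec_detect_style hints (detect_style hints)

-- ===== LEMMAS AND PROOFS =====

-- what _RANK.get(h, 7) computes, string by string
theorem rnk_spec (h : String) :
    rnk h = if h = "modern" ∨ h = "contemporary" then 0
      else if h = "rustic" ∨ h = "farmhouse" then 1
      else if h = "industrial" then 2
      else if h = "transitional" then 3
      else if h = "vintage" ∨ h = "antique" then 4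
      else if h = "elegant" ∨ h = "formal" then 5
      else if h = "traditional" ∨ h = "classic" then 6
      else 7 := by
  by_cases e1 : h = "modern"; · subst e1; decide
  by_cases e2 : h = "contemporary"; · subst e2; decide
  by_cases e3 : h = "rustic"; · subst e3; decide
  by_cases e4 : h = "farmhouse"; · subst e4; decide
  by_cases e5 : h = "industrial"; · subst e5; decide
  by_cases e6 : h = "transitional"; · subst e6; decide
  by_cases e7 : h = "vintage"; · subst e7; decide
  by_cases e8 : h = "antique"; · subst e8; decide
  by_cases e9 : h = "elegant"; · subst e9; decide
  by_cases e10 : h = "formal"; · subst e10; decide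
  by_cases e11 : h = "traditional"; · subst e11; decide
  by_cases e12 : h = "classic"; · subst e12; decide
  have hk : rankDict.keys = ["modern", "contemporary", "rustic", "farmhouse",
    "industrial", "transitional", "vintage", "antique", "elegant", "formal",
    "traditional", "classic"] := by decide
  have hnc : rankDict.contains h = false := by
    rw [Bool.eq_false_iff]
    intro hc
    rw [PySem.Dict.contains_iff_mem_keys, hk] at hc
    simp_all
  unfold rnk
  rw [PySem.Dict.getD_of_not_contains rankDict 7 hnc]
  simp_all

-- the min-fold is ≤ k iff the accumulator is or some hint's rank is
theorem fold_le_iff (hints : List String) (b k : Nat) :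
    (hints.foldl (fun best h => min best (rnk h)) b ≤ k) ↔
      (b ≤ k ∨ ∃ h ∈ hints, rnk h ≤ k) := by
  induction hints generalizing b with
  | nil => simp
  | cons x t ih =>
    simp only [List.foldl_cons, ih, min_le_iff, List.mem_cons]
    aesop

-- the min-fold as a cascade over which keywords appear
set_option maxHeartbeats 2000000 in
theorem fold_eq (hints : List String) :
    hints.foldl (fun best h => min best (rnk h)) 7 =
      if hints.contains "modern" = true ∨ hints.contains "contemporary" = true then 0
      else if hints.contains "rustic" = true ∨ hints.contains "farmhouse" = true then 1
      else if hints.contains "industrial" = true then 2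
      else if hints.contains "transitional" = true then 3
      else if hints.contains "vintage" = true ∨ hints.contains "antique" = true then 4
      else if hints.contains "elegant" = true ∨ hints.contains "formal" = true then 5
      else if hints.contains "traditional" = true ∨ hints.contains "classic" = true then 6
      else 7 := by
  simp only [List.contains_iff_mem]
  have up : ∀ (w : String) (k : Nat), w ∈ hints → rnk w ≤ k →
      hints.foldl (fun best h => min best (rnk h)) 7 ≤ k := by
    intro w k hw hr
    rw [fold_le_iff]
    exact .inr ⟨w, hw, hr⟩
  have low : ∀ k : Nat, k < 7 → (∀ w ∈ hints, ¬ rnk w ≤ k) →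
      ¬ (hints.foldl (fun best h => min best (rnk h)) 7 ≤ k) := by
    intro k hk7 H
    rw [fold_le_iff]
    push_neg
    exact ⟨by omega, fun w hw => by have := H w hw; omega⟩
  split_ifs with h0 h1 h2 h3 h4 h5 h6
  · have hle : hints.foldl (fun best h => min best (rnk h)) 7 ≤ 0 := by
      rcases h0 with h | h
      · exact up _ 0 h (by decide)
      · exact up _ 0 h (by decide)
    omega
  · have hle : hints.foldl (fun best h => min best (rnk h)) 7 ≤ 1 := by
      rcases h1 with h | h
      · exact up _ 1 h (by decide)
      · exact up _ 1 h (by decide)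
    have hlow := low 0 (by omega) (by
      intro w hw
      have hs := rnk_spec w
      split_ifs at hs <;> first | omega | (rcases ‹_ ∨ _› with rfl | rfl <;> simp_all))
    omega
  · have hle := up _ 2 h2 (by decide)
    have hlow := low 1 (by omega) (by
      intro w hw
      have hs := rnk_spec w
      split_ifs at hs <;> first | omega | (rcases ‹_ ∨ _› with rfl | rfl <;> simp_all))
    omega
  · have hle := up _ 3 h3 (by decide)
    have hlow := low 2 (by omega) (by
      intro w hw
      have hs := rnk_spec w
      split_ifs at hs <;> first | omega | (rcases ‹_ ∨ _› with rfl | rfl <;> simp_all) | simp_all)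
    omega
  · have hle : hints.foldl (fun best h => min best (rnk h)) 7 ≤ 4 := by
      rcases h4 with h | h
      · exact up _ 4 h (by decide)
      · exact up _ 4 h (by decide)
    have hlow := low 3 (by omega) (by
      intro w hw
      have hs := rnk_spec w
      split_ifs at hs <;> first | omega | (rcases ‹_ ∨ _› with rfl | rfl <;> simp_all) | simp_all)
    omega
  · have hle : hints.foldl (fun best h => min best (rnk h)) 7 ≤ 5 := by
      rcases h5 with h | h
      · exact up _ 5 h (by decide)
      · exact up _ 5 h (by decide)
    have hlow := low 4 (by omega) (by
      intro w hw
      have hs := rnk_spec w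
      split_ifs at hs <;> first | omega | (rcases ‹_ ∨ _› with rfl | rfl <;> simp_all) | simp_all)
    omega
  · have hle : hints.foldl (fun best h => min best (rnk h)) 7 ≤ 6 := by
      rcases h6 with h | h
      · exact up _ 6 h (by decide)
      · exact up _ 6 h (by decide)
    have hlow := low 5 (by omega) (by
      intro w hw
      have hs := rnk_spec w
      split_ifs at hs <;> first | omega | (rcases ‹_ ∨ _› with rfl | rfl <;> simp_all) | simp_all)
    omega
  · have hle : hints.foldl (fun best h => min best (rnk h)) 7 ≤ 7 := by
      rw [fold_le_iff]
      exact .inl le_rfl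
    have hlow := low 6 (by omega) (by
      intro w hw
      have hs := rnk_spec w
      split_ifs at hs <;> first | omega | (rcases ‹_ ∨ _› with rfl | rfl <;> simp_all) | simp_all)
    omega

-- ===== VERDICT (by name: the statement is the Claim_ definition above) =====
theorem detect_style_spec : Claim_equal_detect_style := by
  intro hints _
  unfold Spec_detect_style detect_style detect_style_alt
  rw [fold_eq]
  simp only [List.any_cons, List.any_nil, Bool.or_false, Bool.or_eq_true]
  split_ifs <;> rfl
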